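-- pv_equiv track=rewrite | github.com/ptrekkk/scholar-showcase | src/pages/tournaments_components/battle_info_card.py | format_finish_counts
-- ===== SOURCE A (Python) =====
-- def format_finish_counts(places):
--     return {
--         "first": places.count(1),
--         "second": places.count(2),
--         "third": places.count(3),
--         "top10": sum(1 for p in places if 4 <= p <= 10),
--         "over10": sum(1 for p in places if p > 10),
--     }
-- ===== SOURCE B (Python) =====
-- def format_finish_counts(places):
--     first = second = third = top10 = over10 = 0
--     for p in places:
--         if p == 1:
--             first += 1
--         elif p == 2:
--             second += 1
--         elif p == 3:
--             third += 1
--         elif 4 <= p <= 10: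
--             top10 += 1
--         elif p > 10:
--             over10 += 1
--     return {
--         "first": first,
--         "second": second,
--         "third": third,
--         "top10": top10,
--         "over10": over10,
--     }
-- ===== Notes on version B (the rewrite author's own statement) =====
-- stated objective: alternative
-- what changed: Replaces A's five separate scans of the list (three .count calls and two generator sums) with a single pass that classifies each place into one of five counters via an if/elif chain.
import Mathlib
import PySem

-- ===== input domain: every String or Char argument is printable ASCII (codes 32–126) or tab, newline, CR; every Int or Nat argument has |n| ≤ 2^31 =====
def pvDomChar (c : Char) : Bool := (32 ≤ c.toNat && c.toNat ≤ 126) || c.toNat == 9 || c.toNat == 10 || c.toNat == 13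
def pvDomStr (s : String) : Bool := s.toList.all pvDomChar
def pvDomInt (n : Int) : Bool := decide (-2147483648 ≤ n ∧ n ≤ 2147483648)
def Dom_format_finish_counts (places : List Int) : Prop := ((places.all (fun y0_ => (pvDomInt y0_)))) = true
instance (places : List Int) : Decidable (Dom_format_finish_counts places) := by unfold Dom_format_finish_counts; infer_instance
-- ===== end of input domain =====

-- B replaces A's five separate scans of the list with one pass that classifies each
-- element into its five counters (objective: alternative single-pass decomposition).

-- ===== PORT A =====
-- A: dict literal with three .count calls and two generator sums (five scans).
def format_finish_counts (places : List Int) : List (String × Int) :=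
  [("first", PySem.List.count places 1),
   ("second", PySem.List.count places 2),
   ("third", PySem.List.count places 3),
   ("top10", ((places.filter (fun p => decide (4 ≤ p ∧ p ≤ 10))).map (fun _ => (1 : Int))).sum),
   ("over10", ((places.filter (fun p => decide (p > 10))).map (fun _ => (1 : Int))).sum)]

-- ===== PORT B =====
-- B: one fold over places carrying the five counters.
def fcAltStep (s : Int × Int × Int × Int × Int) (p : Int) : Int × Int × Int × Int × Int :=
  let (first, second, third, top10, over10) := s
  if p = 1 then (first + 1, second, third, top10, over10)
  else if p = 2 then (first, second + 1, third, top10, over10)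
  else if p = 3 then (first, second, third + 1, top10, over10)
  else if 4 ≤ p ∧ p ≤ 10 then (first, second, third, top10 + 1, over10)
  else if p > 10 then (first, second, third, top10, over10 + 1)
  else (first, second, third, top10, over10)

def format_finish_counts_alt (places : List Int) : List (String × Int) :=
  let (first, second, third, top10, over10) := places.foldl fcAltStep (0, 0, 0, 0, 0)
  [("first", first), ("second", second), ("third", third), ("top10", top10), ("over10", over10)]

-- ===== PRECONDITION & SPEC =====
def Spec_format_finish_counts (places : List Int) (out : List (String × Int)) : Prop := out = format_finish_counts_alt places
instance (places : List Int) (out : List (String × Int)) : Decidable (Spec_format_finish_counts places out) := by unfold Spec_format_finish_counts; infer_instance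

-- ===== CLAIM (what is proved, stated in full; the proofs are below) =====
def Claim_equal_format_finish_counts : Prop := ∀ (places : List Int), Dom_format_finish_counts places → Spec_format_finish_counts places (format_finish_counts places)

-- ===== LEMMAS AND PROOFS =====

theorem fcAlt_fold (places : List Int) (a b c d e : Int) :
    places.foldl fcAltStep (a, b, c, d, e) =
      (a + PySem.List.count places 1,
       b + PySem.List.count places 2,
       c + PySem.List.count places 3,
       d + ((places.filter (fun p => decide (4 ≤ p ∧ p ≤ 10))).map (fun _ => (1 : Int))).sum,
       e + ((places.filter (fun p => decide (p > 10))).map (fun _ => (1 : Int))).sum) := by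
  induction places generalizing a b c d e with
  | nil => simp [PySem.List.count]
  | cons x xs ih =>
    simp only [List.foldl_cons, fcAltStep]
    split_ifs with h1 h2 h3 h4 h5 <;>
      simp_all [ih, PySem.List.count] <;> omega

-- ===== VERDICT (by name: the statement is the Claim_ definition above) =====
theorem format_finish_counts_spec : Claim_equal_format_finish_counts := by
  intro places _
  show _ = _
  simp [format_finish_counts, format_finish_counts_alt, fcAlt_fold]
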